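-- pv_equiv track=rewrite | github.com/yeongkyo1997/Algorithm | Algorithm/python/Main_1081.py | solve
-- ===== SOURCE A (Python) =====
-- def solve(n):
--     if n <= 0:
--         return 0
--     c = [0] * 10
--     s = 1
--     sum = 0
--     while n > 0:
--         t = n // (s * 10)
--         r = n % (s * 10)
--         for i in range(10):
--             c[i] += t * s
--         for i in range(1, r // s + 1):
--             c[i] += s
--         c[(r // s + 1) % 10] += r % s
--         n -= 9 * s
--         s *= 10
--     for i in range(1, 10):
--         sum += i * c[i]
--     return sum
-- ===== SOURCE B (Python) =====
-- def solve(n):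
--     if n <= 0:
--         return 0
--     return _total(n)
--
-- def _digit_sum(x):
--     s = 0
--     while x > 0:
--         x, d = divmod(x, 10)
--         s += d
--     return s
--
-- def _total(n):
--     # sum of decimal digit sums of 0..n (n >= 0), by the recurrence
--     # S(10q+r) = 10*S(q) + 45*q + (r-9)*digit_sum(q) + r*(r+1)//2
--     if n < 10:
--         return n * (n + 1) // 2
--     q, r = divmod(n, 10)
--     return 10 * _total(q) + 45 * q + (r - 9) * _digit_sum(q) + r * (r + 1) // 2
-- ===== Notes on version B (the rewrite author's own statement) =====
-- stated objective: alternative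
-- what changed: Replaces A's per-place digit-frequency table (the c[] counter array updated by three inner loops per place, with the s*=10 / n-=9*s progression, then a weighted sum) by a direct divide-by-ten recurrence for the sum of digit sums of the whole range, using a plain divmod digit-sum helper; no frequency table and no place-value loop remain.
import Mathlib
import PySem

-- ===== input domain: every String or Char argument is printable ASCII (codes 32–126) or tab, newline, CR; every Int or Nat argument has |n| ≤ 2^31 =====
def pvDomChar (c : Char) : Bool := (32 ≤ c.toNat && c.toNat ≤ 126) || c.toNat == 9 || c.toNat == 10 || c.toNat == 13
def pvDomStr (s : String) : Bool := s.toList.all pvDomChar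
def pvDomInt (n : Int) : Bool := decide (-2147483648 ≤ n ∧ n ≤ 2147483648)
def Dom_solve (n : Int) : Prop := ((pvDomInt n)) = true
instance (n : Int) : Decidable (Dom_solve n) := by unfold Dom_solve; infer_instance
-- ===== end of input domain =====

-- B replaces A's per-place digit-frequency table (c[], s*=10 / n-=9*s progression) with a
-- direct recurrence on n//10 for the sum of digit sums; alternative decomposition of the
-- same task (similar cost, no speed claim).

-- ===== PORT A =====
-- while n > 0: t = n//(s*10); r = n%(s*10); c[i]+=t*s for i in 0..9; c[i]+=s for i in 1..r//s;
-- c[(r//s+1)%10] += r%s; n -= 9*s; s *= 10.  ('1 ≤ s' in the guard is a totality guard only: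
-- the loop is entered with s = 1 and s only ever gets multiplied by 10.)
def solveLoop (n s : Int) (c : List Int) : List Int :=
  if 0 < n ∧ 1 ≤ s then
    let t := PySem.Int.floordiv n (s * 10)
    let r := PySem.Int.mod n (s * 10)
    let c1 := (PySem.List.pyRange 0 10 1).foldl
      (fun cc i => cc.set i.toNat (cc.getD i.toNat 0 + t * s)) c
    let c2 := (PySem.List.pyRange 1 (PySem.Int.floordiv r s + 1) 1).foldl
      (fun cc i => cc.set i.toNat (cc.getD i.toNat 0 + s)) c1
    let j := PySem.Int.mod (PySem.Int.floordiv r s + 1) 10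
    let c3 := c2.set j.toNat (c2.getD j.toNat 0 + PySem.Int.mod r s)
    solveLoop (n - 9 * s) (s * 10) c3
  else c
termination_by n.toNat
decreasing_by omega

def solve (n : Int) : Int :=
  if n ≤ 0 then 0
  else
    let c := solveLoop n 1 (List.replicate 10 0)
    (PySem.List.pyRange 1 10 1).foldl (fun acc i => acc + i * c.getD i.toNat 0) 0

-- ===== PORT B =====
-- while x > 0: x, d = divmod(x, 10); s += d
def digitSumLoop (x s : Int) : Int :=
  if 0 < x then digitSumLoop (PySem.Int.floordiv x 10) (s + PySem.Int.mod x 10) else s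
termination_by x.toNat
decreasing_by simp only [PySem.Int.floordiv_eq_ediv_of_pos (by omega : (0:Int) < 10)]; omega

-- sum of digit sums of 0..n via S(10q+r) = 10*S(q) + 45*q + (r-9)*ds(q) + r*(r+1)//2
def totalRec (n : Int) : Int :=
  if n < 10 then PySem.Int.floordiv (n * (n + 1)) 2
  else
    let q := PySem.Int.floordiv n 10
    let r := PySem.Int.mod n 10
    10 * totalRec q + 45 * q + (r - 9) * digitSumLoop q 0 + PySem.Int.floordiv (r * (r + 1)) 2
termination_by n.toNat
decreasing_by simp only [PySem.Int.floordiv_eq_ediv_of_pos (by omega : (0:Int) < 10)]; omega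

def solve_alt (n : Int) : Int :=
  if n ≤ 0 then 0 else totalRec n

-- ===== PRECONDITION & SPEC =====
def Spec_solve (n : Int) (out : Int) : Prop := out = solve_alt n
instance (n : Int) (out : Int) : Decidable (Spec_solve n out) := by unfold Spec_solve; infer_instance

-- ===== CLAIM (what is proved, stated in full; the proofs are below) =====
def Claim_equal_solve : Prop := ∀ (n : Int), Dom_solve n → Spec_solve n (solve n)

-- ===== LEMMAS AND PROOFS =====

-- proof-side vocabulary: triI d = 0+1+…+(d-1); placeSum N s = Σ_{x=0}^{N} digit of x at place s
-- (closed form); LSum N s = Σ over places s,10s,100s,… ≤ N of placeSum; dsFrom q s = digits of q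
-- at places s,10s,… summed.
def triI (d : Int) : Int := d * (d - 1) / 2

def placeSum (N s : Int) : Int :=
  45 * (N / (10 * s)) * s + s * triI ((N / s) % 10) + ((N / s) % 10) * (N % s + 1)

def LSum (N s : Int) : Int :=
  if 1 ≤ s ∧ s ≤ N then placeSum N s + LSum N (10 * s) else 0
termination_by (N + 1 - s).toNat
decreasing_by omega

def dsFrom (q s : Int) : Int :=
  if 1 ≤ s ∧ s ≤ q then (q / s) % 10 + dsFrom q (10 * s) else 0
termination_by (q + 1 - s).toNat
decreasing_by omega

def wsum (c : List Int) : Int :=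
  (PySem.List.pyRange 1 10 1).foldl (fun acc i => acc + i * c.getD i.toNat 0) 0

-- div/mod toolkit
lemma decomp_div_mod (a b q r : Int) (hb : 0 < b) (h : a = b * q + r)
    (h0 : 0 ≤ r) (h1 : r < b) : a / b = q ∧ a % b = r := by
  constructor
  · rw [h, add_comm, Int.add_mul_ediv_left r q hb.ne', Int.ediv_eq_zero_of_lt h0 h1]; ring
  · rw [h, add_comm, Int.add_mul_emod_self_left, Int.emod_eq_of_lt h0 h1]

lemma emod_mul_split (N s : Int) (hs : 0 < s) :
    N % (10 * s) = 10 * ((N / 10) % s) + N % 10 := by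
  have h1 : (10:Int) * (N / 10) + N % 10 = N := Int.ediv_add_emod N 10
  have h2 : s * (N / 10 / s) + (N / 10) % s = N / 10 := Int.ediv_add_emod (N / 10) s
  have hm : 0 ≤ (N / 10) % s := Int.emod_nonneg _ hs.ne'
  have hm' : (N / 10) % s < s := Int.emod_lt_of_pos _ hs
  have h10 : 0 ≤ N % 10 := Int.emod_nonneg _ (by norm_num)
  have h10' : N % 10 < 10 := Int.emod_lt_of_pos _ (by norm_num)
  have hd : N = (10 * ((N / 10) % s) + N % 10) + (10 * s) * (N / 10 / s) := by
    linear_combination -h1 - 10 * h2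
  exact (decomp_div_mod N (10 * s) (N / 10 / s) _ (by positivity)
    (by linarith [hd]) (by omega) (by omega)).2

lemma ediv_ediv10 (N s : Int) : N / 10 / s = N / (10 * s) :=
  Int.ediv_ediv_eq_ediv_mul (by norm_num)

lemma placeSum_shift (N s : Int) (hs : 0 < s) :
    placeSum N (10 * s) = 10 * placeSum (N / 10) s + (N % 10 - 9) * ((N / 10 / s) % 10) := by
  have e1 : N / 10 / s = N / (10 * s) := ediv_ediv10 N s
  have e2 : N / 10 / (10 * s) = N / (10 * (10 * s)) := ediv_ediv10 N (10 * s)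
  have e3 := emod_mul_split N s hs
  unfold placeSum
  rw [e1, e2, e3]
  ring

lemma dsFrom_shift (N s : Int) (hN : 0 ≤ N) (hs : 0 < s) :
    dsFrom N (10 * s) = dsFrom (N / 10) s := by
  have key : ∀ (k : ℕ) (s : Int), 0 < s → (N + 1 - s).toNat = k →
      dsFrom N (10 * s) = dsFrom (N / 10) s := by
    intro k
    induction k using Nat.strong_induction_on with
    | _ k IH =>
      intro s hs hk
      have hiff : (10 * s ≤ N) ↔ (s ≤ N / 10) := by
        rw [Int.le_ediv_iff_mul_le (by norm_num : (0:Int) < 10)]; constructor <;> intro h <;> linarith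
      by_cases hc : 10 * s ≤ N
      · have hs2 : s ≤ N / 10 := hiff.mp hc
        have l1 : dsFrom N (10 * s) = N / (10 * s) % 10 + dsFrom N (10 * (10 * s)) := by
          rw [dsFrom, if_pos ⟨by omega, hc⟩]
        have l2 : dsFrom (N / 10) s = N / 10 / s % 10 + dsFrom (N / 10) (10 * s) := by
          rw [dsFrom, if_pos ⟨by omega, hs2⟩]
        rw [l1, l2, ediv_ediv10 N s,
          IH (N + 1 - 10 * s).toNat (by omega) (10 * s) (by omega) rfl]
      · have l1 : dsFrom N (10 * s) = 0 := by rw [dsFrom, if_neg (by omega)]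
        have l2 : dsFrom (N / 10) s = 0 := by
          rw [dsFrom, if_neg (fun h => hc (hiff.mpr h.2))]
        rw [l1, l2]
  exact key (N + 1 - s).toNat s hs rfl

lemma LSum_shift (N s : Int) (hN : 0 ≤ N) (hs : 0 < s) :
    LSum N (10 * s) = 10 * LSum (N / 10) s + (N % 10 - 9) * dsFrom (N / 10) s := by
  have key : ∀ (k : ℕ) (s : Int), 0 < s → (N + 1 - s).toNat = k →
      LSum N (10 * s) = 10 * LSum (N / 10) s + (N % 10 - 9) * dsFrom (N / 10) s := by
    intro k
    induction k using Nat.strong_induction_on with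
    | _ k IH =>
      intro s hs hk
      have hiff : (10 * s ≤ N) ↔ (s ≤ N / 10) := by
        rw [Int.le_ediv_iff_mul_le (by norm_num : (0:Int) < 10)]; constructor <;> intro h <;> linarith
      by_cases hc : 10 * s ≤ N
      · have hs2 : s ≤ N / 10 := hiff.mp hc
        have hL1 : LSum N (10 * s) = placeSum N (10 * s) + LSum N (10 * (10 * s)) := by
          rw [LSum, if_pos ⟨by omega, hc⟩]
        have hL2 : LSum (N / 10) s = placeSum (N / 10) s + LSum (N / 10) (10 * s) := by
          rw [LSum, if_pos ⟨by omega, hs2⟩]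
        have hD2 : dsFrom (N / 10) s = N / 10 / s % 10 + dsFrom (N / 10) (10 * s) := by
          rw [dsFrom, if_pos ⟨by omega, hs2⟩]
        rw [hL1, hL2, hD2,
          IH (N + 1 - 10 * s).toNat (by omega) (10 * s) (by omega) rfl,
          placeSum_shift N s hs, ediv_ediv10 N s]
        ring
      · have hL1 : LSum N (10 * s) = 0 := by rw [LSum, if_neg (by omega)]
        have hL2 : LSum (N / 10) s = 0 := by
          rw [LSum, if_neg (fun h => hc (hiff.mpr h.2))]
        have hD2 : dsFrom (N / 10) s = 0 := by
          rw [dsFrom, if_neg (fun h => hc (hiff.mpr h.2))]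
        rw [hL1, hL2, hD2]
        ring
  exact key (N + 1 - s).toNat s hs rfl

lemma digitSumLoop_eq (x : Int) (hx : 0 ≤ x) :
    ∀ acc, digitSumLoop x acc = acc + dsFrom x 1 := by
  have key : ∀ (k : ℕ) (x : Int), 0 ≤ x → x.toNat = k →
      ∀ acc, digitSumLoop x acc = acc + dsFrom x 1 := by
    intro k
    induction k using Nat.strong_induction_on with
    | _ k IH =>
      intro x hx hk acc
      by_cases hpos : 0 < x
      · have h10 : (0:Int) < 10 := by norm_num
        rw [digitSumLoop, if_pos hpos, PySem.Int.floordiv_eq_ediv_of_pos h10,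
          PySem.Int.mod_eq_emod_of_pos h10]
        have hdiv : 0 ≤ x / 10 := Int.ediv_nonneg hx (by norm_num)
        have hlt : (x / 10).toNat < k := by omega
        rw [IH _ hlt _ hdiv rfl]
        have hunf : dsFrom x 1 = x % 10 + dsFrom (x / 10) 1 := by
          rw [dsFrom, if_pos ⟨le_refl 1, hpos⟩, Int.ediv_one,
            dsFrom_shift x 1 hx one_pos]
        rw [hunf]
        ring
      · have hx0 : x = 0 := by omega
        subst hx0
        rw [digitSumLoop, if_neg (by omega), dsFrom, if_neg (by omega)]
        ring
  exact key x.toNat x hx rfl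

lemma tri_plus (r : Int) (h : 0 ≤ r ∧ r ≤ 9) : triI r + r = r * (r + 1) / 2 := by
  obtain ⟨h0, h1⟩ := h
  interval_cases r <;> decide

lemma totalRec_eq (n : Int) (hn : 0 ≤ n) : totalRec n = LSum n 1 := by
  have key : ∀ (k : ℕ) (n : Int), 0 ≤ n → n.toNat = k → totalRec n = LSum n 1 := by
    intro k
    induction k using Nat.strong_induction_on with
    | _ k IH =>
      intro n hn hk
      have h10 : (0:Int) < 10 := by norm_num
      by_cases hsmall : n < 10
      · rw [totalRec, if_pos hsmall, PySem.Int.floordiv_eq_ediv_of_pos (by norm_num : (0:Int) < 2)]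
        by_cases h0 : n = 0
        · subst h0
          rw [LSum, if_neg (by omega)]
          decide
        · have hL : LSum n 1 = placeSum n 1 + LSum n (10 * 1) := by
            rw [LSum, if_pos ⟨le_refl 1, by omega⟩]
          have hL2 : LSum n (10 * 1) = 0 := by rw [LSum, if_neg (by omega)]
          rw [hL, hL2]
          unfold placeSum
          simp only [mul_one, Int.ediv_one, Int.emod_one]
          rw [Int.ediv_eq_zero_of_lt hn hsmall, Int.emod_eq_of_lt hn hsmall]
          unfold triI
          have h1 : 1 ≤ n := by omega
          interval_cases n <;> decide
      · have hunf : totalRec n = 10 * totalRec (PySem.Int.floordiv n 10)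
            + 45 * PySem.Int.floordiv n 10
            + (PySem.Int.mod n 10 - 9) * digitSumLoop (PySem.Int.floordiv n 10) 0
            + PySem.Int.floordiv (PySem.Int.mod n 10 * (PySem.Int.mod n 10 + 1)) 2 := by
          rw [totalRec, if_neg hsmall]
        rw [hunf, PySem.Int.floordiv_eq_ediv_of_pos h10,
          PySem.Int.mod_eq_emod_of_pos h10,
          PySem.Int.floordiv_eq_ediv_of_pos (by norm_num : (0:Int) < 2)]
        have hq : 0 ≤ n / 10 := Int.ediv_nonneg hn (by norm_num)
        have hR : LSum n 1 = placeSum n 1 + LSum n (10 * 1) := by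
          rw [LSum, if_pos ⟨le_refl 1, by omega⟩]
        have hps : placeSum n 1 = 45 * (n / 10) + triI (n % 10) + n % 10 := by
          unfold placeSum
          simp only [mul_one, Int.ediv_one, Int.emod_one]
          ring
        have hshift := LSum_shift n 1 hn one_pos
        rw [IH (n / 10).toNat (by omega) _ hq rfl,
          digitSumLoop_eq (n / 10) hq 0,
          hR, hps, hshift]
        have htri := tri_plus (n % 10) ⟨by omega, by omega⟩
        have h2 : (n % 10) * (n % 10 + 1) / 2 = triI (n % 10) + n % 10 := htri.symm
        rw [h2]
        ring
  exact key n.toNat n hn rfl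

-- A-side
lemma wsum_eq (c : List Int) : wsum c =
    c.getD 1 0 + 2 * c.getD 2 0 + 3 * c.getD 3 0 + 4 * c.getD 4 0 + 5 * c.getD 5 0
      + 6 * c.getD 6 0 + 7 * c.getD 7 0 + 8 * c.getD 8 0 + 9 * c.getD 9 0 := by
  have hpr : PySem.List.pyRange 1 10 1 = [1,2,3,4,5,6,7,8,9] := by decide
  rw [wsum, hpr]
  simp only [List.foldl_cons, List.foldl_nil, Int.toNat_one,
    show Int.toNat 2 = 2 from rfl, show Int.toNat 3 = 3 from rfl, show Int.toNat 4 = 4 from rfl,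
    show Int.toNat 5 = 5 from rfl, show Int.toNat 6 = 6 from rfl, show Int.toNat 7 = 7 from rfl,
    show Int.toNat 8 = 8 from rfl, show Int.toNat 9 = 9 from rfl]
  ring

lemma wsum_c3 (c : List Int) (h : c.length = 10) (j x : Int) (hj : 0 ≤ j ∧ j ≤ 9) :
    wsum (c.set j.toNat (c.getD j.toNat 0 + x)) = wsum c + j * x := by
  obtain ⟨hj0, hj9⟩ := hj
  rw [wsum_eq, wsum_eq c]
  interval_cases j <;>
    simp [List.getD_eq_getElem?_getD, h] <;> ring

lemma wsum_fold (x : Int) : ∀ (l : List Int) (c : List Int),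
    (∀ i ∈ l, 0 ≤ i ∧ i ≤ 9) → c.length = 10 →
    wsum (l.foldl (fun cc i => cc.set i.toNat (cc.getD i.toNat 0 + x)) c)
      = wsum c + l.sum * x := by
  intro l
  induction l with
  | nil => intro c _ _; simp
  | cons i l ih =>
    intro c hmem hlen
    rw [List.foldl_cons,
      ih _ (fun i hi => hmem i (List.mem_cons_of_mem _ hi)) (by rw [List.length_set, hlen]),
      wsum_c3 c hlen i x (hmem i List.mem_cons_self), List.sum_cons]
    ring

lemma wsum_c1 (c : List Int) (h : c.length = 10) (x : Int) :
    wsum ((PySem.List.pyRange 0 10 1).foldl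
      (fun cc i => cc.set i.toNat (cc.getD i.toNat 0 + x)) c) = wsum c + 45 * x := by
  rw [wsum_fold x _ c (by decide) h]
  norm_num [show (PySem.List.pyRange 0 10 1).sum = 45 from by decide]

lemma wsum_c2 (c : List Int) (h : c.length = 10) (d s : Int) (hd : 0 ≤ d ∧ d ≤ 9) :
    wsum ((PySem.List.pyRange 1 (d + 1) 1).foldl
      (fun cc i => cc.set i.toNat (cc.getD i.toNat 0 + s)) c) = wsum c + triI (d + 1) * s := by
  obtain ⟨hd0, hd9⟩ := hd
  rw [wsum_fold s _ c
    (fun i hi => by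
      have := (PySem.List.mem_pyRange_one).mp hi
      omega) h]
  have hsum : (PySem.List.pyRange 1 (d + 1) 1).sum = triI (d + 1) := by
    interval_cases d <;> decide
  rw [hsum]

lemma foldl_set_len (l : List Int) (g : List Int → Int → Int) : ∀ c : List Int,
    (l.foldl (fun cc i => cc.set i.toNat (g cc i)) c).length = c.length := by
  induction l with
  | nil => intro c; rfl
  | cons y ys ih => intro c; rw [List.foldl_cons, ih, List.length_set]

lemma len_c1 (c : List Int) (x : Int) :
    ((PySem.List.pyRange 0 10 1).foldl
      (fun cc i => cc.set i.toNat (cc.getD i.toNat 0 + x)) c).length = c.length :=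
  foldl_set_len _ (fun cc i => cc.getD i.toNat 0 + x) c

lemma len_c2 (c : List Int) (b s : Int) :
    ((PySem.List.pyRange 1 b 1).foldl
      (fun cc i => cc.set i.toNat (cc.getD i.toNat 0 + s)) c).length = c.length :=
  foldl_set_len _ (fun cc i => cc.getD i.toNat 0 + s) c

lemma tri_succ (d : Int) (h : 0 ≤ d ∧ d ≤ 9) : triI (d + 1) = triI d + d := by
  obtain ⟨h0, h1⟩ := h
  interval_cases d <;> decide

lemma contrib_eq_placeSum (n s : Int) (_hn : 0 < n) (hs : 1 ≤ s) :
    45 * (n / (10 * s)) * s + triI (n % (10 * s) / s + 1) * s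
      + ((n % (10 * s) / s + 1) % 10) * (n % (10 * s) % s)
      = placeSum (n + s - 1) s := by
  have hs0 : (0:Int) < s := hs
  have h10s : (0:Int) < 10 * s := by linarith
  have key : ∀ t r d e : Int, n = (10*s)*t + r → r = s*d + e →
      0 ≤ e → e < s → 0 ≤ d → d ≤ 9 →
      45 * t * s + triI (d + 1) * s + ((d + 1) % 10) * e = placeSum (n + s - 1) s := by
    intro t r d e hn_eq hr_eq he0 he1 hd0 hd9
    unfold placeSum
    rcases eq_or_lt_of_le he0 with he' | he'
    · -- e = 0
      have he0' : e = 0 := he'.symm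
      rcases eq_or_lt_of_le hd9 with hc9 | hc8
      · -- d = 9
        have hN1 : n + s - 1 = (10*s)*t + (10*s - 1) := by
          linear_combination hn_eq + hr_eq + he0' + s * hc9
        obtain ⟨hT, hR⟩ := decomp_div_mod (n+s-1) (10*s) t (10*s - 1) h10s hN1
          (by linarith) (by linarith)
        have hN2 : n + s - 1 = s*(10*t + 9) + (s - 1) := by
          linear_combination hn_eq + hr_eq + he0' + s * hc9
        obtain ⟨hDv, hM⟩ := decomp_div_mod (n+s-1) s (10*t + 9) (s - 1) hs0 hN2
          (by linarith) (by linarith)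
        have hDm : (10*t + 9) % 10 = 9 := by
          rw [show (10:Int)*t + 9 = 9 + 10*t by ring, Int.add_mul_emod_self_left]
          decide
        rw [hT, hDv, hM, hDm, hc9, he0']
        norm_num [triI]
        ring
      · -- d ≤ 8
        have hd8 : d ≤ 8 := by omega
        have hds0 : 0 ≤ d*s := mul_nonneg hd0 (by linarith)
        have hds8 : d*s ≤ 8*s := mul_le_mul_of_nonneg_right hd8 (by linarith)
        have hN1 : n + s - 1 = (10*s)*t + (d*s + (s - 1)) := by
          linear_combination hn_eq + hr_eq + he0'
        obtain ⟨hT, hR⟩ := decomp_div_mod (n+s-1) (10*s) t (d*s + (s - 1)) h10s hN1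
          (by linarith) (by linarith)
        have hN2 : n + s - 1 = s*(10*t + d) + (s - 1) := by
          linear_combination hn_eq + hr_eq + he0'
        obtain ⟨hDv, hM⟩ := decomp_div_mod (n+s-1) s (10*t + d) (s - 1) hs0 hN2
          (by linarith) (by linarith)
        have hDm : (10*t + d) % 10 = d := by
          rw [show (10:Int)*t + d = d + 10*t by ring, Int.add_mul_emod_self_left]
          exact Int.emod_eq_of_lt hd0 (by omega)
        have hj : (d + 1) % 10 = d + 1 := Int.emod_eq_of_lt (by omega) (by omega)
        rw [hT, hDv, hM, hDm, hj, he0', tri_succ d ⟨hd0, hd9⟩]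
        ring
    · -- 1 ≤ e
      rcases eq_or_lt_of_le hd9 with hc9 | hc8
      · -- d = 9
        have hN1 : n + s - 1 = (10*s)*(t+1) + (e - 1) := by
          linear_combination hn_eq + hr_eq + s * hc9
        obtain ⟨hT, hR⟩ := decomp_div_mod (n+s-1) (10*s) (t+1) (e - 1) h10s hN1
          (by linarith) (by linarith)
        have hN2 : n + s - 1 = s*(10*t + 10) + (e - 1) := by
          linear_combination hn_eq + hr_eq + s * hc9
        obtain ⟨hDv, hM⟩ := decomp_div_mod (n+s-1) s (10*t + 10) (e - 1) hs0 hN2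
          (by linarith) (by linarith)
        have hDm : (10*t + 10) % 10 = 0 := by
          rw [show (10:Int)*t + 10 = 0 + 10*(t+1) by ring, Int.add_mul_emod_self_left]
          decide
        have hj : ((d : Int) + 1) % 10 = 0 := by rw [hc9]; decide
        rw [hT, hDv, hM, hDm, hj, hc9]
        norm_num [triI]
        ring
      · -- d ≤ 8
        have hd8 : d ≤ 8 := by omega
        have hds0 : 0 ≤ (d+1)*s := mul_nonneg (by omega) (by linarith)
        have hds9 : (d+1)*s ≤ 9*s := mul_le_mul_of_nonneg_right (by omega) (by linarith)
        have hN1 : n + s - 1 = (10*s)*t + ((d+1)*s + (e - 1)) := by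
          linear_combination hn_eq + hr_eq
        obtain ⟨hT, hR⟩ := decomp_div_mod (n+s-1) (10*s) t ((d+1)*s + (e - 1)) h10s hN1
          (by linarith) (by linarith)
        have hN2 : n + s - 1 = s*(10*t + (d+1)) + (e - 1) := by
          linear_combination hn_eq + hr_eq
        obtain ⟨hDv, hM⟩ := decomp_div_mod (n+s-1) s (10*t + (d+1)) (e - 1) hs0 hN2
          (by linarith) (by linarith)
        have hDm : (10*t + (d+1)) % 10 = d + 1 := by
          rw [show (10:Int)*t + (d+1) = (d+1) + 10*t by ring, Int.add_mul_emod_self_left]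
          exact Int.emod_eq_of_lt (by omega) (by omega)
        have hj : (d + 1) % 10 = d + 1 := Int.emod_eq_of_lt (by omega) (by omega)
        rw [hT, hDv, hM, hDm, hj]
        ring
  have hr0 : 0 ≤ n % (10*s) := Int.emod_nonneg n h10s.ne'
  have hr1 : n % (10*s) < 10*s := Int.emod_lt_of_pos n h10s
  have hd9 : n % (10*s) / s ≤ 9 := by
    have := (Int.ediv_lt_iff_lt_mul hs0 (a := n % (10*s)) (b := 10)).mpr (by linarith)
    omega
  exact key (n / (10*s)) (n % (10*s)) (n % (10*s) / s) (n % (10*s) % s)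
    (by linear_combination (Int.ediv_add_emod n (10*s)).symm)
    (by linear_combination (Int.ediv_add_emod (n % (10*s)) s).symm)
    (Int.emod_nonneg _ hs0.ne') (Int.emod_lt_of_pos _ hs0)
    (Int.ediv_nonneg hr0 (by linarith)) hd9

lemma solveLoop_pos (n s : Int) (c : List Int) (hn : 0 < n) (hs : 1 ≤ s) :
    solveLoop n s c = solveLoop (n - 9*s) (s*10)
      (((PySem.List.pyRange 1 (PySem.Int.floordiv (PySem.Int.mod n (s * 10)) s + 1) 1).foldl
          (fun cc i => cc.set i.toNat (cc.getD i.toNat 0 + s))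
          ((PySem.List.pyRange 0 10 1).foldl
            (fun cc i => cc.set i.toNat (cc.getD i.toNat 0 + PySem.Int.floordiv n (s * 10) * s)) c)).set
        (PySem.Int.mod (PySem.Int.floordiv (PySem.Int.mod n (s * 10)) s + 1) 10).toNat
        (((PySem.List.pyRange 1 (PySem.Int.floordiv (PySem.Int.mod n (s * 10)) s + 1) 1).foldl
            (fun cc i => cc.set i.toNat (cc.getD i.toNat 0 + s))
            ((PySem.List.pyRange 0 10 1).foldl
              (fun cc i => cc.set i.toNat (cc.getD i.toNat 0 + PySem.Int.floordiv n (s * 10) * s)) c)).getD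
          (PySem.Int.mod (PySem.Int.floordiv (PySem.Int.mod n (s * 10)) s + 1) 10).toNat 0
         + PySem.Int.mod (PySem.Int.mod n (s * 10)) s)) := by
  rw [solveLoop, if_pos ⟨hn, hs⟩]

lemma solveLoop_wsum (n : Int) : ∀ s c, 1 ≤ s → c.length = 10 →
    wsum (solveLoop n s c) = wsum c + LSum (n + s - 1) s := by
  have key : ∀ (k : ℕ) (n s : Int) (c : List Int), n.toNat = k → 1 ≤ s → c.length = 10 →
      wsum (solveLoop n s c) = wsum c + LSum (n + s - 1) s := by
    intro k
    induction k using Nat.strong_induction_on with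
    | _ k IH =>
      intro n s c hk hs hc
      by_cases hn : 0 < n
      · have hs0 : (0:Int) < s := hs
        have hs10 : (0:Int) < s * 10 := by linarith
        rw [solveLoop_pos n s c hn hs]
        rw [PySem.Int.floordiv_eq_ediv_of_pos hs10, PySem.Int.mod_eq_emod_of_pos hs10,
          PySem.Int.floordiv_eq_ediv_of_pos hs0, PySem.Int.mod_eq_emod_of_pos hs0,
          PySem.Int.mod_eq_emod_of_pos (show (0:Int) < 10 by norm_num)]
        rw [show s * 10 = 10 * s from mul_comm s 10]
        have hr0 : 0 ≤ n % (10*s) := Int.emod_nonneg n (by positivity)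
        have hr1 : n % (10*s) < 10*s := Int.emod_lt_of_pos n (by positivity)
        have hd0 : 0 ≤ n % (10*s) / s := Int.ediv_nonneg hr0 (by linarith)
        have hd9 : n % (10*s) / s ≤ 9 := by
          have := (Int.ediv_lt_iff_lt_mul hs0 (a := n % (10*s)) (b := 10)).mpr (by linarith)
          omega
        have hj0 : 0 ≤ (n % (10*s) / s + 1) % 10 := Int.emod_nonneg _ (by norm_num)
        have hj9 : (n % (10*s) / s + 1) % 10 ≤ 9 := by
          have := Int.emod_lt_of_pos (n % (10*s) / s + 1) (show (0:Int) < 10 by norm_num)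
          omega
        have hlen1 : ((PySem.List.pyRange 0 10 1).foldl
            (fun cc i => cc.set i.toNat (cc.getD i.toNat 0 + n / (10*s) * s)) c).length = 10 := by
          rw [len_c1, hc]
        have hlen2 : ((PySem.List.pyRange 1 (n % (10*s) / s + 1) 1).foldl
            (fun cc i => cc.set i.toNat (cc.getD i.toNat 0 + s))
            ((PySem.List.pyRange 0 10 1).foldl
              (fun cc i => cc.set i.toNat (cc.getD i.toNat 0 + n / (10*s) * s)) c)).length = 10 := by
          rw [len_c2, hlen1]
        rw [IH (n - 9*s).toNat (by omega) (n - 9*s) (10*s) _ rfl (by linarith)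
          (by rw [List.length_set, hlen2])]
        rw [wsum_c3 _ hlen2 _ _ ⟨hj0, hj9⟩,
          wsum_c2 _ hlen1 _ _ ⟨hd0, hd9⟩,
          wsum_c1 _ hc _]
        have hLu : LSum (n + s - 1) s = placeSum (n + s - 1) s + LSum (n + s - 1) (10*s) := by
          rw [LSum, if_pos ⟨hs, by omega⟩]
        have harg : n - 9*s + 10*s - 1 = n + s - 1 := by ring
        have hcontrib := contrib_eq_placeSum n s hn hs
        rw [harg, hLu]
        linarith [hcontrib]
      · rw [solveLoop, if_neg (by tauto), LSum, if_neg (by omega)]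
        ring
  intro s c hs hc
  exact key n.toNat n s c rfl hs hc

-- ===== VERDICT (by name: the statement is the Claim_ definition above) =====
theorem solve_spec : Claim_equal_solve := by
  intro n _
  unfold Spec_solve
  by_cases h : n ≤ 0
  · rw [solve, if_pos h, solve_alt, if_pos h]
  · have hn0 : (0:Int) ≤ n := by omega
    have hw : solve n = wsum (solveLoop n 1 (List.replicate 10 0)) := by
      rw [solve, if_neg h, wsum]
    rw [hw, solveLoop_wsum n 1 (List.replicate 10 0) (le_refl 1) (by simp),
      show wsum (List.replicate 10 0) = 0 from by decide,
      show n + 1 - 1 = n from by ring,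
      solve_alt, if_neg h, totalRec_eq n hn0]
    ring
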